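-- pv_equiv track=rewrite | github.com/VectorSpaceLab/LightRAG | AceRAG/src/modeling_taczip.py | convert_token_indices
-- ===== SOURCE A (Python) =====
-- import math
--
-- def convert_token_indices(overall_length, importance_token_indices, encoder_max_length=4096):
--     # convert importance token indices:
--     # e.g. [[12, 23, 4096, 4098]] => [[12, 23], [0, 2]]
--     if overall_length <= encoder_max_length:
--         return [importance_token_indices]
--     token_indices = [[]]
--     for _ in range(math.floor(overall_length / encoder_max_length)):
--         token_indices.append([])
--     for idx2 in importance_token_indices:
--         idx1 = math.floor(idx2 / encoder_max_length)
--         token_indices[idx1].append(idx2 - idx1 * encoder_max_length)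
--
--     return token_indices
-- ===== SOURCE B (Python) =====
-- import math
--
-- def convert_token_indices(overall_length, importance_token_indices, encoder_max_length=4096):
--     # Build the result bucket-by-bucket: for each chunk i, scan the indices and keep
--     # those that fall in chunk i, shifted into chunk-local coordinates.
--     if overall_length <= encoder_max_length:
--         return [importance_token_indices]
--     n = math.floor(overall_length / encoder_max_length) + 1
--     return [[idx - i * encoder_max_length
--              for idx in importance_token_indices
--              if math.floor(idx / encoder_max_length) == i]
--             for i in range(n)]
-- ===== Notes on version B (the rewrite author's own statement) =====
-- stated objective: alternative
-- what changed: Inverts the control flow: instead of A's single dispatch pass appending each index into a pre-built mutable bucket list, B iterates over the buckets on the outside and for each bucket scans the indices, filtering and shifting those that belong to it.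
-- outside the precondition, e.g. on convert_token_indices(10, [11, -2], 3): A returns [[], [], [], [2, 1]], B returns [[], [], [], [2]]; on convert_token_indices(10, [2], -3): A returns [[-1]], B returns []
import Mathlib
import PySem

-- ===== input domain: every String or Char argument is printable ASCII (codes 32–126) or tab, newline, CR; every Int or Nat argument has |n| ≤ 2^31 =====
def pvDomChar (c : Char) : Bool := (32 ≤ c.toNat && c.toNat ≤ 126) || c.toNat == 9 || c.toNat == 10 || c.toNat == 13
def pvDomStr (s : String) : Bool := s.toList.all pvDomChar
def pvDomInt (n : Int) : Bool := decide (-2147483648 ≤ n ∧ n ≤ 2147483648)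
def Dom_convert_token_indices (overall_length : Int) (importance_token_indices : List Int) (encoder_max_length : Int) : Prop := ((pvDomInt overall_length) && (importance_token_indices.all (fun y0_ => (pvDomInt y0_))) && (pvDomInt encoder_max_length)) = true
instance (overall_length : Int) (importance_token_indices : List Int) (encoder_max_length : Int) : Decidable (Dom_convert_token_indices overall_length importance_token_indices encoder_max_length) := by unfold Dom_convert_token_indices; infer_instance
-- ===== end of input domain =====

-- B inverts the control flow: an outer loop over the buckets with an inner filtering scan of the
-- indices, instead of A's single dispatch pass into a pre-built mutable bucket list; equivalence
-- is proved on Pre_ (the natural domain). math.floor(x/y) on Python floats is ported as exact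
-- integer floor division: on Dom (|ints| ≤ 2^31) the float quotient is within 2^-21 of the exact
-- one and its rounding cannot cross an integer, so the floors coincide.

-- ===== PORT A =====
-- token_indices[idx1].append(v) : Python list indexing with wraparound for a negative index
-- (an out-of-range index raises IndexError in Python and is excluded by Pre_; here it is a no-op).
def pyAppendAt (tis : List (List Int)) (i : Int) (v : Int) : List (List Int) :=
  let j : Int := if i < 0 then i + tis.length else i
  tis.mapIdx (fun k l => if (k : Int) = j then l ++ [v] else l)

def convert_token_indices (overall_length : Int) (importance_token_indices : List Int) (encoder_max_length : Int) : List (List Int) :=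
  if overall_length ≤ encoder_max_length then [importance_token_indices]
  else
    let init : List (List Int) :=
      (PySem.List.pyRange 0 (PySem.Int.floordiv overall_length encoder_max_length) 1).foldl
        (fun acc _ => acc ++ [[]]) [[]]
    importance_token_indices.foldl
      (fun tis idx2 =>
        let idx1 := PySem.Int.floordiv idx2 encoder_max_length
        pyAppendAt tis idx1 (idx2 - idx1 * encoder_max_length))
      init

-- ===== PORT B =====
def convert_token_indices_alt (overall_length : Int) (importance_token_indices : List Int) (encoder_max_length : Int) : List (List Int) :=
  if overall_length ≤ encoder_max_length then [importance_token_indices]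
  else
    let n := PySem.Int.floordiv overall_length encoder_max_length + 1
    (PySem.List.pyRange 0 n 1).map (fun i =>
      (importance_token_indices.filter
          (fun idx => PySem.Int.floordiv idx encoder_max_length == i)).map
        (fun idx => idx - i * encoder_max_length))

-- ===== PRECONDITION & SPEC =====
-- Pre_ restricts to the function's natural domain: either no chunking applies, or the chunk size
-- is positive and the token indices are valid nonnegative positions below the bucketed range.
-- Outside it A raises ZeroDivisionError/IndexError, or chunks by a negative size, or buckets
-- malformed negative token indices by Python negative-index wraparound, where A's landing of a
-- wrapped index in the last bucket is accidental and B's bucket scan drops it.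
def Pre_convert_token_indices (overall_length : Int) (importance_token_indices : List Int) (encoder_max_length : Int) : Prop :=
  overall_length ≤ encoder_max_length ∨
  (1 ≤ encoder_max_length ∧
    ∀ idx ∈ importance_token_indices,
      0 ≤ idx ∧ idx < (PySem.Int.floordiv overall_length encoder_max_length + 1) * encoder_max_length)
instance (overall_length : Int) (importance_token_indices : List Int) (encoder_max_length : Int) : Decidable (Pre_convert_token_indices overall_length importance_token_indices encoder_max_length) := by unfold Pre_convert_token_indices; infer_instance

def pvWitness_convert_token_indices : Int × List Int × Int := (10000, [12, 23, 4096, 4098], 4096)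

def Spec_convert_token_indices (overall_length : Int) (importance_token_indices : List Int) (encoder_max_length : Int) (out : List (List Int)) : Prop := out = convert_token_indices_alt overall_length importance_token_indices encoder_max_length
instance (overall_length : Int) (importance_token_indices : List Int) (encoder_max_length : Int) (out : List (List Int)) : Decidable (Spec_convert_token_indices overall_length importance_token_indices encoder_max_length out) := by unfold Spec_convert_token_indices; infer_instance

-- ===== CLAIM (what is proved, stated in full; the proofs are below) =====
def Claim_equal_convert_token_indices : Prop := ∀ (overall_length : Int) (importance_token_indices : List Int) (encoder_max_length : Int), Dom_convert_token_indices overall_length importance_token_indices encoder_max_length → Pre_convert_token_indices overall_length importance_token_indices encoder_max_length → Spec_convert_token_indices overall_length importance_token_indices encoder_max_length (convert_token_indices overall_length importance_token_indices encoder_max_length)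

-- ===== LEMMAS AND PROOFS =====

-- building the initial bucket list appends one empty bucket per range element
theorem foldl_append_empty (r : List Int) (s : List (List Int)) :
    r.foldl (fun acc _ => acc ++ [([] : List Int)]) s = s ++ List.replicate r.length [] := by
  induction r generalizing s with
  | nil => simp
  | cons a t ih =>
    simp only [List.foldl_cons, ih, List.length_cons]
    rw [List.replicate_succ]
    simp

theorem mapIdx_mapIdx_int (l : List (List Int)) (f g : Nat → List Int → List Int) :
    (l.mapIdx g).mapIdx f = l.mapIdx (fun i a => f i (g i a)) := by
  apply List.ext_getElem <;> simp

-- the dispatch loop of A, characterised: each bucket k ends up with the shifted indices whose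
-- floor-quotient is k, in input order
theorem fold_step (E : Int) (hE : 0 < E) (xs : List Int) :
    ∀ (tis : List (List Int)),
      (∀ idx ∈ xs, 0 ≤ idx ∧ PySem.Int.floordiv idx E < (tis.length : Int)) →
      xs.foldl
        (fun tis idx2 =>
          let idx1 := PySem.Int.floordiv idx2 E
          pyAppendAt tis idx1 (idx2 - idx1 * E)) tis
      = tis.mapIdx (fun k l =>
          l ++ (xs.filter (fun idx => PySem.Int.floordiv idx E = (k : Int))).map
                (fun idx => idx - (k : Int) * E)) := by
  induction xs with
  | nil =>
    intro tis _
    apply List.ext_getElem <;> simp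
  | cons idx rest ih =>
    intro tis h
    have h0 := h idx (by simp)
    have hnn : 0 ≤ PySem.Int.floordiv idx E := by
      rw [PySem.Int.floordiv_eq_ediv_of_pos hE]
      exact Int.ediv_nonneg h0.1 (le_of_lt hE)
    have hlen : (pyAppendAt tis (PySem.Int.floordiv idx E) (idx - PySem.Int.floordiv idx E * E)).length = tis.length := by
      simp [pyAppendAt]
    simp only [List.foldl_cons]
    rw [ih _ (by
      intro y hy
      rw [hlen]
      exact h y (List.mem_cons_of_mem _ hy))]
    have hApp : pyAppendAt tis (PySem.Int.floordiv idx E) (idx - PySem.Int.floordiv idx E * E)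
        = tis.mapIdx (fun k l => if (k : Int) = PySem.Int.floordiv idx E then l ++ [idx - PySem.Int.floordiv idx E * E] else l) := by
      simp only [pyAppendAt]
      rw [if_neg (by omega)]
    rw [hApp, mapIdx_mapIdx_int]
    apply List.ext_getElem
    · simp
    · intro k h1 h2
      simp only [List.getElem_mapIdx]
      by_cases hk : (k : Int) = PySem.Int.floordiv idx E
      · simp [hk]
      · simp [hk, Ne.symm hk]

-- ===== VERDICT (by name: the statement is the Claim_ definition above) =====
theorem convert_token_indices_spec : Claim_equal_convert_token_indices := by
  intro L xs E _hDom hPre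
  unfold Spec_convert_token_indices convert_token_indices convert_token_indices_alt
  by_cases hle : L ≤ E
  · simp [hle]
  · simp only [if_neg hle]
    obtain ⟨hE, hIdx⟩ := hPre.resolve_left hle
    have hnn : ∀ idx ∈ xs, 0 ≤ idx := fun idx h => (hIdx idx h).1
    have hb : ∀ idx ∈ xs, idx < (PySem.Int.floordiv L E + 1) * E := fun idx h => (hIdx idx h).2
    have hE' : (0 : Int) < E := by omega
    have hLnn : 0 ≤ PySem.Int.floordiv L E := by
      rw [PySem.Int.floordiv_eq_ediv_of_pos hE']
      exact Int.ediv_nonneg (by omega) (le_of_lt hE')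
    set q := PySem.Int.floordiv L E with hq
    have hfd : ∀ idx ∈ xs, 0 ≤ PySem.Int.floordiv idx E ∧ PySem.Int.floordiv idx E < q + 1 := by
      intro idx hidx
      constructor
      · rw [PySem.Int.floordiv_eq_ediv_of_pos hE']
        exact Int.ediv_nonneg (hnn idx hidx) (le_of_lt hE')
      · exact (PySem.Int.floordiv_lt_iff_lt_mul hE').mpr (hb idx hidx)
    -- A's side in canonical form
    have hinit : (PySem.List.pyRange 0 q 1).foldl (fun acc _ => acc ++ [([] : List Int)]) [[]]
        = List.replicate (q.toNat + 1) [] := by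
      rw [foldl_append_empty, PySem.List.length_pyRange_one]
      simp [List.replicate_succ]
    rw [hinit, fold_step E hE' xs _ (by
      intro idx hidx
      have hcast : ((List.replicate (q.toNat + 1) ([] : List Int)).length : Int) = q + 1 := by
        simp; omega
      rw [hcast]
      exact ⟨hnn idx hidx, (hfd idx hidx).2⟩)]
    -- compare the two bucket lists elementwise
    apply List.ext_getElem
    · simp [PySem.List.length_pyRange_one]; omega
    · intro k h1 h2
      simp only [List.getElem_mapIdx, List.getElem_replicate, List.nil_append, List.getElem_map]
      rw [PySem.List.getElem_pyRange_one]
      simp only [Int.zero_add]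
      congr 1
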